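-- pv_equiv track=rewrite | github.com/evon-su/warehouse | arrange_warehouse.py | get_repeat_ls
-- ===== SOURCE A (Python) =====
-- def get_repeat_ls(cargo_ls):
--     used = set()
--     ls = []
--     for item in cargo_ls:
--         cargo = item[0]
--         cargo_group = item[1]
--         space = item[2]
--         if cargo and cargo not in used:
--             ls.append((True, cargo, cargo_group, space))
--             used.add(cargo)
--         else:
--             ls.append((False, cargo, cargo_group, space))
--     return ls
-- ===== SOURCE B (Python) =====
-- def get_repeat_ls(cargo_ls):
--     first_idx = {}
--     for i, item in enumerate(cargo_ls):
--         cargo = item[0]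
--         if cargo and cargo not in first_idx:
--             first_idx[cargo] = i
--     return [(bool(item[0]) and first_idx.get(item[0]) == i, item[0], item[1], item[2])
--             for i, item in enumerate(cargo_ls)]
-- ===== Notes on version B (the rewrite author's own statement) =====
-- stated objective: alternative
-- what changed: Replaces the single stateful pass carrying a 'seen' set with two passes: first build a dict mapping each truthy cargo id to the index of its first occurrence, then emit the output by comparing each position's index against that table.
import Mathlib
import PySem

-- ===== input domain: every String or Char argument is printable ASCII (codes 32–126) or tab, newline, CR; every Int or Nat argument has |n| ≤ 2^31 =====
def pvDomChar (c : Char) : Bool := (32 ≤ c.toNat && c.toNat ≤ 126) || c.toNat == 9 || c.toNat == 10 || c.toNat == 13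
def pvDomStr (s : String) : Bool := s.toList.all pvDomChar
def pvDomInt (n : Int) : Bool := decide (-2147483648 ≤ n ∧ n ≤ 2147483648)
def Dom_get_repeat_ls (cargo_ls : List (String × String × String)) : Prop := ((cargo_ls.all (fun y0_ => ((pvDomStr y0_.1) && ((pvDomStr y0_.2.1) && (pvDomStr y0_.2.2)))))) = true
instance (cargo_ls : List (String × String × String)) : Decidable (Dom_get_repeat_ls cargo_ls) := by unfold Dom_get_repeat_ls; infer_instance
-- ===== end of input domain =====

-- B replaces A's single stateful pass carrying a 'seen' set by two passes: build a
-- first-occurrence index table, then emit by index comparison (alternative decomposition, same cost).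

-- ===== PORT A =====
-- the for-loop over cargo_ls, state = the 'used' set; appending to ls = consing in recursion
def getRepeatLoopA (used : PySem.Set String) : List (String × String × String) → List (Bool × String × String × String)
  | [] => []
  | item :: rest =>
    let cargo := item.1
    let cargo_group := item.2.1
    let space := item.2.2
    if cargo ≠ "" ∧ cargo ∉ used then
      (true, cargo, cargo_group, space) :: getRepeatLoopA (PySem.Set.add used cargo) rest
    else
      (false, cargo, cargo_group, space) :: getRepeatLoopA used rest

def get_repeat_ls (cargo_ls : List (String × String × String)) : List (Bool × String × String × String) :=
  getRepeatLoopA PySem.Set.empty cargo_ls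

-- ===== PORT B =====
-- first loop: first_idx[cargo] = i for the first truthy occurrence of each cargo
def buildFirstIdx (i : Int) (d : PySem.Dict String Int) : List (String × String × String) → PySem.Dict String Int
  | [] => d
  | item :: rest =>
      buildFirstIdx (i + 1)
        (if item.1 ≠ "" ∧ d.contains item.1 = false then d.insert item.1 i else d) rest

-- second loop: emit (cargo truthy and first_idx.get(cargo) == i, cargo, group, space)
def emitRepeat (d : PySem.Dict String Int) (i : Int) : List (String × String × String) → List (Bool × String × String × String)
  | [] => []
  | item :: rest =>
      (decide (item.1 ≠ "" ∧ d.get? item.1 = some i), item.1, item.2.1, item.2.2) ::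
        emitRepeat d (i + 1) rest

def get_repeat_ls_alt (cargo_ls : List (String × String × String)) : List (Bool × String × String × String) :=
  emitRepeat (buildFirstIdx 0 PySem.Dict.empty cargo_ls) 0 cargo_ls

-- ===== PRECONDITION & SPEC =====
def Spec_get_repeat_ls (cargo_ls : List (String × String × String)) (out : List (Bool × String × String × String)) : Prop := out = get_repeat_ls_alt cargo_ls
instance (cargo_ls : List (String × String × String)) (out : List (Bool × String × String × String)) : Decidable (Spec_get_repeat_ls cargo_ls out) := by unfold Spec_get_repeat_ls; infer_instance

-- ===== CLAIM (what is proved, stated in full; the proofs are below) =====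
def Claim_equal_get_repeat_ls : Prop := ∀ (cargo_ls : List (String × String × String)), Dom_get_repeat_ls cargo_ls → Spec_get_repeat_ls cargo_ls (get_repeat_ls cargo_ls)

-- ===== LEMMAS AND PROOFS =====

-- values already present in the dict survive the rest of the build pass
theorem buildFirstIdx_get?_mono (l : List (String × String × String)) (i : Int)
    (d : PySem.Dict String Int) (c : String) (v : Int) (h : d.get? c = some v) :
    (buildFirstIdx i d l).get? c = some v := by
  induction l generalizing i d with
  | nil => simpa [buildFirstIdx] using h
  | cons item rest ih =>
    simp only [buildFirstIdx]
    apply ih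
    split_ifs with hg
    · rcases hg with ⟨_, hnc⟩
      have hne : c ≠ item.1 := by
        intro he
        rw [he, (PySem.Dict.get?_eq_none_iff_contains d item.1).mpr hnc] at h
        simp at h
      rw [PySem.Dict.get?_insert_of_ne d i hne]; exact h
    · exact h

-- loop invariant: A's 'used' set and B's partial dict have the same keys, all values < i
theorem loop_eq (l : List (String × String × String)) (used : PySem.Set String)
    (d : PySem.Dict String Int) (i : Int)
    (hk : ∀ c, c ∈ used ↔ d.contains c = true)
    (hv : ∀ c v, d.get? c = some v → v < i) :
    getRepeatLoopA used l = emitRepeat (buildFirstIdx i d l) i l := by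
  induction l generalizing used d i with
  | nil => rfl
  | cons item rest ih =>
    by_cases hc : item.1 ≠ "" ∧ item.1 ∉ used
    · -- first truthy occurrence: flag true on both sides
      have hnc : d.contains item.1 = false := by
        rcases Bool.eq_false_or_eq_true (d.contains item.1) with h | h
        · exact absurd ((hk item.1).mpr h) hc.2
        · exact h
      have hgB : item.1 ≠ "" ∧ d.contains item.1 = false := ⟨hc.1, hnc⟩
      simp only [getRepeatLoopA, buildFirstIdx, emitRepeat, if_pos hc, if_pos hgB]
      have hk' : ∀ c, c ∈ PySem.Set.add used item.1 ↔ (d.insert item.1 i).contains c = true := by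
        intro c
        rw [PySem.Set.mem_add, PySem.Dict.contains_insert, hk c]
        constructor
        · rintro (h | h) <;> simp [h]
        · intro h
          rcases Bool.or_eq_true_iff.mp h with h | h
          · exact Or.inr (by simpa using h)
          · exact Or.inl h
      have hv' : ∀ c v, (d.insert item.1 i).get? c = some v → v < i + 1 := by
        intro c v hcv
        by_cases hce : c = item.1
        · subst hce
          rw [PySem.Dict.get?_insert_self] at hcv
          injection hcv with hvi
          omega
        · rw [PySem.Dict.get?_insert_of_ne d i hce] at hcv
          have := hv c v hcv; omega
      rw [ih (PySem.Set.add used item.1) (d.insert item.1 i) (i + 1) hk' hv']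
      have hget : (buildFirstIdx (i + 1) (d.insert item.1 i) rest).get? item.1 = some i :=
        buildFirstIdx_get?_mono rest (i + 1) _ item.1 i (PySem.Dict.get?_insert_self d item.1 i)
      simp [hget, hc.1]
    · -- falsy cargo, or cargo seen before: flag false on both sides
      have hguardB : ¬ (item.1 ≠ "" ∧ d.contains item.1 = false) := by
        rintro ⟨h1, h2⟩
        apply hc
        refine ⟨h1, fun hm => ?_⟩
        rw [(hk item.1).mp hm] at h2; simp at h2
      simp only [getRepeatLoopA, buildFirstIdx, emitRepeat, if_neg hc, if_neg hguardB]
      rw [ih used d (i + 1) hk (fun c v hcv => by have := hv c v hcv; omega)]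
      by_cases h1 : item.1 = ""
      · simp [h1]
      · -- seen before: dict already holds a value < i for this cargo, so its lookup ≠ some i
        have hm : item.1 ∈ used := by
          by_contra hnm; exact hc ⟨h1, hnm⟩
        have hct : d.contains item.1 = true := (hk item.1).mp hm
        rcases ho : d.get? item.1 with _ | v
        · rw [(PySem.Dict.get?_eq_none_iff_contains d item.1).mp ho] at hct
          simp at hct
        · have hvi := hv _ _ ho
          have hgv : (buildFirstIdx (i + 1) d rest).get? item.1 = some v :=
            buildFirstIdx_get?_mono rest (i + 1) d item.1 v ho
          have hne : (some v : Option Int) ≠ some i := by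
            intro hx; injection hx with hx; omega
          simp [hgv, hne]

-- ===== VERDICT (by name: the statement is the Claim_ definition above) =====
theorem get_repeat_ls_spec : Claim_equal_get_repeat_ls := by
  intro cargo_ls _
  unfold Spec_get_repeat_ls get_repeat_ls get_repeat_ls_alt
  apply loop_eq
  · intro c; simp [PySem.Set.empty, PySem.Dict.contains_empty]
  · intro c v h; rw [PySem.Dict.get?_empty] at h; simp at h
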